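-- pv_equiv track=rewrite | github.com/nishio/atcoder | abc177/c.py | solve
-- ===== SOURCE A (Python) =====
-- MOD = 10 ** 9 + 7
--
-- def solve(N, AS):
--     sum = 0
--     sumSq = 0
--     for i in range(N):
--         sum += AS[i]
--         sum %= MOD
--         sumSq += AS[i] * AS[i]
--         sumSq %= MOD
--
--     ret = (sum * sum - sumSq) % MOD
--     if ret % 2 == 0:
--         return ret // 2
--     else:
--         return (ret + MOD) // 2
-- ===== SOURCE B (Python) =====
-- MOD = 10 ** 9 + 7
--
-- def solve(N, AS):
--     # First pass: total sum mod p.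
--     total = 0
--     for i in range(N):
--         total = (total + AS[i]) % MOD
--     # Second pass: peel elements off the total so it becomes the suffix sum,
--     # and accumulate a_i * (sum of elements after i).
--     ans = 0
--     for i in range(N):
--         total = (total - AS[i]) % MOD
--         ans = (ans + AS[i] * total) % MOD
--     return ans
-- ===== Notes on version B (the rewrite author's own statement) =====
-- stated objective: simpler
-- what changed: B makes two plain passes: it computes the total sum mod p, then peels each element off the total so it holds the suffix sum and accumulates a_i*suffix, eliminating A's sum-of-squares accumulator, the (S^2-sum a_i^2)/2 identity and the even/odd modular-halving fixup.
import Mathlib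
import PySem

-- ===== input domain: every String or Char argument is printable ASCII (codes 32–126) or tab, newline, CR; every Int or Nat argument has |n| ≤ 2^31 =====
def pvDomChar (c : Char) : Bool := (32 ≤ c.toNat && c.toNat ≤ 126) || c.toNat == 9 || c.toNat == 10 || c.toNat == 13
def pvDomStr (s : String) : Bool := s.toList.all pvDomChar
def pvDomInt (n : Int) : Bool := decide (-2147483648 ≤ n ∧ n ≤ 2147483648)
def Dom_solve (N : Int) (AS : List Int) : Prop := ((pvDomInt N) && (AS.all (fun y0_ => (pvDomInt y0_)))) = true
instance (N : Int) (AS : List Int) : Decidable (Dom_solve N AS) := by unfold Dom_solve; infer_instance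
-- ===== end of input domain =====

-- B computes ∑_{i<j} AS[i]·AS[j] mod p in two plain passes (total sum, then peel off to suffix
-- sums and accumulate a_i·suffix), replacing A's sum-of-squares accumulator, the (S²−Σaᵢ²)/2
-- identity and the even/odd modular-halving fixup (objective: simpler).

-- ===== PORT A =====
def pvMOD : Int := 1000000007

def pvStepA (AS : List Int) (st : Int × Int) (i : Int) : Int × Int :=
  (PySem.Int.mod (st.1 + PySem.List.pyGetD AS i 0) pvMOD,
   PySem.Int.mod (st.2 + PySem.List.pyGetD AS i 0 * PySem.List.pyGetD AS i 0) pvMOD)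

def solve (N : Int) (AS : List Int) : Int :=
  let st := (PySem.List.pyRange 0 N 1).foldl (pvStepA AS) (0, 0)
  let ret := PySem.Int.mod (st.1 * st.1 - st.2) pvMOD
  if PySem.Int.mod ret 2 = 0 then PySem.Int.floordiv ret 2
  else PySem.Int.floordiv (ret + pvMOD) 2

-- ===== PORT B =====
-- first pass of Source B: total = (total + AS[i]) % MOD
def pvTotStep (AS : List Int) (t : Int) (i : Int) : Int :=
  PySem.Int.mod (t + PySem.List.pyGetD AS i 0) pvMOD

-- second pass of Source B: total = (total - AS[i]) % MOD; ans = (ans + AS[i]*total) % MOD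
def pvPeelStep (AS : List Int) (p : Int × Int) (i : Int) : Int × Int :=
  let t := PySem.Int.mod (p.1 - PySem.List.pyGetD AS i 0) pvMOD
  (t, PySem.Int.mod (p.2 + PySem.List.pyGetD AS i 0 * t) pvMOD)

def solve_alt (N : Int) (AS : List Int) : Int :=
  let total := (PySem.List.pyRange 0 N 1).foldl (pvTotStep AS) 0
  ((PySem.List.pyRange 0 N 1).foldl (pvPeelStep AS) (total, 0)).2

-- ===== PRECONDITION & SPEC =====
-- Pre_ excludes exactly N > len(AS), where both Pythons raise IndexError at AS[i].
def Pre_solve (N : Int) (AS : List Int) : Prop := N ≤ (AS.length : Int)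
instance (N : Int) (AS : List Int) : Decidable (Pre_solve N AS) := by unfold Pre_solve; infer_instance
def pvWitness_solve : Int × List Int := (3, [1, 2, 3])

def Spec_solve (N : Int) (AS : List Int) (out : Int) : Prop := out = solve_alt N AS
instance (N : Int) (AS : List Int) (out : Int) : Decidable (Spec_solve N AS out) := by unfold Spec_solve; infer_instance

-- ===== CLAIM (what is proved, stated in full; the proofs are below) =====
def Claim_equal_solve : Prop := ∀ (N : Int) (AS : List Int), Dom_solve N AS → Pre_solve N AS → Spec_solve N AS (solve N AS)

-- ===== LEMMAS AND PROOFS =====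

theorem pvMOD_pos : (0 : Int) < pvMOD := by norm_num [pvMOD]

theorem pv_modeq (x : Int) : x % pvMOD ≡ x [ZMOD pvMOD] :=
  Int.emod_emod_of_dvd x dvd_rfl

-- the value AS[i] read by both programs
def pvA (AS : List Int) (i : Int) : Int := PySem.List.pyGetD AS i 0

-- exact (un-modded) cross-product accumulator of B's second loop:
-- pvCross T xs = Σ xs_i · (T − xs_0 − … − xs_i)
def pvCross : Int → List Int → Int
  | _, [] => 0
  | T, a :: xs => a * (T - a) + pvCross (T - a) xs

-- A's fold computes (sum % p, sum-of-squares % p)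
theorem pv_foldA (AS : List Int) (L : List Int) : ∀ S Q : Int,
    L.foldl (pvStepA AS) (S % pvMOD, Q % pvMOD)
      = ((S + (L.map (pvA AS)).sum) % pvMOD,
         (Q + ((L.map (pvA AS)).map (fun a => a * a)).sum) % pvMOD) := by
  induction L with
  | nil => intro S Q; simp
  | cons i L ih =>
    intro S Q
    have h1 : pvStepA AS (S % pvMOD, Q % pvMOD) i
        = ((S + pvA AS i) % pvMOD, (Q + pvA AS i * pvA AS i) % pvMOD) := by
      simp only [pvStepA, PySem.Int.mod_eq_emod_of_pos pvMOD_pos, pvA]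
      exact Prod.ext ((pv_modeq S).add_right _) ((pv_modeq Q).add_right _)
    rw [List.foldl_cons, h1, ih]
    simp only [List.map_cons, List.sum_cons, Prod.mk.injEq]
    constructor <;> · congr 1; ring

-- B's first fold computes sum % p
theorem pv_foldTot (AS : List Int) (L : List Int) : ∀ t : Int,
    L.foldl (pvTotStep AS) (t % pvMOD) = (t + (L.map (pvA AS)).sum) % pvMOD := by
  induction L with
  | nil => intro t; simp
  | cons i L ih =>
    intro t
    have h1 : pvTotStep AS (t % pvMOD) i = (t + pvA AS i) % pvMOD := by
      simp only [pvTotStep, PySem.Int.mod_eq_emod_of_pos pvMOD_pos, pvA]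
      exact (pv_modeq t).add_right _
    rw [List.foldl_cons, h1, ih]
    simp only [List.map_cons, List.sum_cons]
    congr 1; ring

-- B's second fold: running state is ((T − processed sum) % p, (Ans + pvCross T processed) % p)
theorem pv_foldPeel (AS : List Int) (L : List Int) : ∀ T Ans : Int,
    L.foldl (pvPeelStep AS) (T % pvMOD, Ans % pvMOD)
      = ((T - (L.map (pvA AS)).sum) % pvMOD,
         (Ans + pvCross T (L.map (pvA AS))) % pvMOD) := by
  induction L with
  | nil => intro T Ans; simp [pvCross]
  | cons i L ih =>
    intro T Ans
    have hg : PySem.List.pyGetD AS i 0 = pvA AS i := rfl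
    have h1 : pvPeelStep AS (T % pvMOD, Ans % pvMOD) i
        = ((T - pvA AS i) % pvMOD, (Ans + pvA AS i * (T - pvA AS i)) % pvMOD) := by
      simp only [pvPeelStep, PySem.Int.mod_eq_emod_of_pos pvMOD_pos, hg]
      have e1 : (T % pvMOD - pvA AS i) % pvMOD = (T - pvA AS i) % pvMOD :=
        (pv_modeq T).sub_right _
      have e2 : (Ans % pvMOD + pvA AS i * ((T - pvA AS i) % pvMOD)) % pvMOD
          = (Ans + pvA AS i * (T - pvA AS i)) % pvMOD :=
        (pv_modeq Ans).add ((Int.ModEq.refl (pvA AS i)).mul (pv_modeq (T - pvA AS i)))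
      rw [e1, e2]
    rw [List.foldl_cons, h1, ih (T - pvA AS i) (Ans + pvA AS i * (T - pvA AS i))]
    simp only [List.map_cons, List.sum_cons, pvCross, Prod.mk.injEq]
    constructor <;> · congr 1; ring

-- with T the full sum, B's accumulator is exactly the pairwise-product sum: 2·pvCross = S² − Σa²
theorem pv_cross_sq (xs : List Int) :
    xs.sum * xs.sum - (xs.map (fun a => a * a)).sum = 2 * pvCross xs.sum xs := by
  induction xs with
  | nil => simp [pvCross]
  | cons a xs ih =>
    simp only [List.sum_cons, List.map_cons, pvCross, add_sub_cancel_left]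
    linear_combination ih

-- the halving fix-up at the end of A recovers T mod p from (2T) mod p
theorem pv_final (S Q T : Int) (h : S * S - Q = 2 * T) :
    (if PySem.Int.mod (PySem.Int.mod ((S % pvMOD) * (S % pvMOD) - Q % pvMOD) pvMOD) 2 = 0
     then PySem.Int.floordiv (PySem.Int.mod ((S % pvMOD) * (S % pvMOD) - Q % pvMOD) pvMOD) 2
     else PySem.Int.floordiv (PySem.Int.mod ((S % pvMOD) * (S % pvMOD) - Q % pvMOD) pvMOD + pvMOD) 2)
      = T % pvMOD := by
  have hr : ((S % pvMOD) * (S % pvMOD) - Q % pvMOD) % pvMOD = (2 * (T % pvMOD)) % pvMOD := by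
    have h1 : (S % pvMOD) * (S % pvMOD) - Q % pvMOD ≡ S * S - Q [ZMOD pvMOD] :=
      ((pv_modeq S).mul (pv_modeq S)).sub (pv_modeq Q)
    have h2 : (2 : Int) * (T % pvMOD) ≡ 2 * T [ZMOD pvMOD] :=
      (Int.ModEq.refl 2).mul (pv_modeq T)
    calc ((S % pvMOD) * (S % pvMOD) - Q % pvMOD) % pvMOD
        = (S * S - Q) % pvMOD := h1
      _ = (2 * T) % pvMOD := by rw [h]
      _ = (2 * (T % pvMOD)) % pvMOD := h2.symm
  rw [PySem.Int.mod_eq_emod_of_pos pvMOD_pos,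
      PySem.Int.mod_eq_emod_of_pos (by norm_num : (0:Int) < 2), hr,
      PySem.Int.floordiv_eq_ediv_of_pos (by norm_num : (0:Int) < 2),
      PySem.Int.floordiv_eq_ediv_of_pos (by norm_num : (0:Int) < 2)]
  clear hr h
  have hM : (0 : Int) < pvMOD := pvMOD_pos
  set t := T % pvMOD with ht
  have ht0 : 0 ≤ t := Int.emod_nonneg T (by omega)
  have ht1 : t < pvMOD := Int.emod_lt_of_pos T hM
  have hre : (2 * t) % pvMOD = 2 * t - pvMOD * (2 * t / pvMOD) := Int.emod_def (2 * t) pvMOD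
  have hq0 : 0 ≤ 2 * t / pvMOD := Int.ediv_nonneg (by omega) (by omega)
  have hq1 : 2 * t / pvMOD < 2 := by
    rw [Int.ediv_lt_iff_lt_mul hM]; omega
  have hodd : pvMOD % 2 = 1 := by norm_num [pvMOD]
  rw [hre]
  generalize hq : 2 * t / pvMOD = q at hq0 hq1 ⊢
  rcases (by omega : q = 0 ∨ q = 1) with h0 | h0 <;> subst h0 <;> split_ifs with hp <;> omega

-- ===== VERDICT (by name: the statement is the Claim_ definition above) =====
theorem solve_spec : Claim_equal_solve := by
  intro N AS _ _
  unfold Spec_solve solve solve_alt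
  set L := PySem.List.pyRange 0 N 1 with hL
  set vals := L.map (pvA AS) with hv
  have hz : (0 : Int) = 0 % pvMOD := by simp
  have hA : L.foldl (pvStepA AS) (0, 0)
      = (vals.sum % pvMOD, (vals.map (fun a => a * a)).sum % pvMOD) := by
    rw [show ((0 : Int), (0 : Int)) = ((0 : Int) % pvMOD, (0 : Int) % pvMOD) by simp,
        pv_foldA]
    simp [hv]
  have hT : L.foldl (pvTotStep AS) 0 = vals.sum % pvMOD := by
    rw [hz, pv_foldTot]; simp [hv]
  have hP : L.foldl (pvPeelStep AS) (vals.sum % pvMOD, 0)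
      = ((vals.sum - vals.sum) % pvMOD, pvCross vals.sum vals % pvMOD) := by
    rw [show ((vals.sum % pvMOD, (0 : Int)) : Int × Int)
          = (vals.sum % pvMOD, (0 : Int) % pvMOD) by simp,
        pv_foldPeel]
    simp [hv]
  simp only [hA, hT, hP]
  exact pv_final vals.sum (vals.map (fun a => a * a)).sum (pvCross vals.sum vals)
    (pv_cross_sq vals)
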